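-- pv_equiv track=rewrite | github.com/FloB0/PnP_Dashboard | util.py | stat_adaption
-- ===== SOURCE A (Python) =====
-- def stat_adaption(input_value):
--     output_value = 0
--
--     while input_value > 0:
--         if output_value < 10:
--             decrement = 1
--         elif output_value < 15:
--             decrement = 2
--         else:
--             decrement = 3
--
--         input_value -= decrement
--         if input_value >= 0:
--             output_value += 1
--         else:
--             break
--
--     return output_value
-- ===== SOURCE B (Python) =====
-- def stat_adaption(input_value):
--     # Closed-form over the three cost tiers: steps 1-10 cost 1, 11-15 cost 2, beyond cost 3.
--     if input_value <= 0:
--         return 0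
--     if input_value <= 10:
--         return input_value
--     if input_value <= 20:
--         return 10 + (input_value - 10) // 2
--     return 15 + (input_value - 20) // 3
-- ===== Notes on version B (the rewrite author's own statement) =====
-- stated objective: faster
-- what changed: Replaced the step-by-step consuming loop with a closed-form piecewise arithmetic formula over the three cost tiers.
import Mathlib
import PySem

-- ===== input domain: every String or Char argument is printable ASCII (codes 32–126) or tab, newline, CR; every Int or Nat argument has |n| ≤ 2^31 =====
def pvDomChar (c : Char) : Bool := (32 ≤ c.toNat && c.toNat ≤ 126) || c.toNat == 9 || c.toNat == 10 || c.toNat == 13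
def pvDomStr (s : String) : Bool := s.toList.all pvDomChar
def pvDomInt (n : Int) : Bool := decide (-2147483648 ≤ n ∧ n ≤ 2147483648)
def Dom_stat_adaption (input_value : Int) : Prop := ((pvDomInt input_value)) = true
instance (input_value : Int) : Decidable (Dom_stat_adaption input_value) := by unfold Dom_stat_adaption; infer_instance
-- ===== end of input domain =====

-- B replaces A's step-by-step consuming loop by a closed-form piecewise formula over the
-- three cost tiers (faster: O(1) instead of O(n)).

-- ===== PORT A =====
-- the per-step decrement chosen inside A's loop (same branches, same order)
def stepDec (output_value : Int) : Int :=
  if output_value < 10 then 1 else if output_value < 15 then 2 else 3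

-- A's while loop, step for step
def stat_adaption_loop (input_value output_value : Int) : Int :=
  if _h1 : input_value > 0 then
    if _h2 : input_value - stepDec output_value ≥ 0 then
      stat_adaption_loop (input_value - stepDec output_value) (output_value + 1)
    else output_value
  else output_value
termination_by input_value.toNat
decreasing_by
  have : 1 ≤ stepDec output_value := by unfold stepDec; split_ifs <;> omega
  omega

def stat_adaption (input_value : Int) : Int := stat_adaption_loop input_value 0

-- ===== PORT B =====
def stat_adaption_alt (input_value : Int) : Int :=
  if input_value ≤ 0 then 0
  else if input_value ≤ 10 then input_value
  else if input_value ≤ 20 then 10 + PySem.Int.floordiv (input_value - 10) 2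
  else 15 + PySem.Int.floordiv (input_value - 20) 3

-- ===== PRECONDITION & SPEC =====
def Spec_stat_adaption (input_value : Int) (out : Int) : Prop := out = stat_adaption_alt input_value
instance (input_value : Int) (out : Int) : Decidable (Spec_stat_adaption input_value out) := by unfold Spec_stat_adaption; infer_instance

-- ===== CLAIM (what is proved, stated in full; the proofs are below) =====
def Claim_equal_stat_adaption : Prop := ∀ (input_value : Int), Dom_stat_adaption input_value → Spec_stat_adaption input_value (stat_adaption input_value)

-- ===== LEMMAS AND PROOFS =====

-- closed form of A's loop, valid for any state with 0 ≤ input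
def pvF (input output : Int) : Int :=
  if output < 10 then
    (if input < 10 - output then output + input
     else if input < 20 - output then 10 + (input - (10 - output)) / 2
     else 15 + (input - (20 - output)) / 3)
  else if output < 15 then
    (if input < 2 * (15 - output) then output + input / 2
     else 15 + (input - 2 * (15 - output)) / 3)
  else output + input / 3

lemma loop_closed : ∀ (n : Nat) (input output : Int), 0 ≤ input → input ≤ (n : Int) →
    stat_adaption_loop input output = pvF input output := by
  intro n
  induction n with
  | zero =>
    intro input output h0 h1
    rw [stat_adaption_loop, dif_neg (by omega)]
    unfold pvF; split_ifs <;> omega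
  | succ n ih =>
    intro input output h0 h1
    by_cases hp : input > 0
    · rw [stat_adaption_loop, dif_pos hp]
      have hd : 1 ≤ stepDec output ∧ stepDec output ≤ 3 := by
        unfold stepDec; split_ifs <;> omega
      by_cases h2 : input - stepDec output ≥ 0
      · rw [dif_pos h2, ih _ _ h2 (by omega)]
        unfold stepDec at *
        unfold pvF; split_ifs at * <;> omega
      · rw [dif_neg h2]
        unfold stepDec at h2
        unfold pvF; split_ifs at * <;> omega
    · rw [stat_adaption_loop, dif_neg hp]
      unfold pvF; split_ifs <;> omega

-- ===== VERDICT (by name: the statement is the Claim_ definition above) =====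
theorem stat_adaption_spec : Claim_equal_stat_adaption := by
  intro n _
  unfold Spec_stat_adaption stat_adaption stat_adaption_alt
  by_cases hp : n > 0
  · rw [loop_closed n.toNat n 0 (by omega) (by omega)]
    rw [PySem.Int.floordiv_eq_ediv_of_pos (a := n - 10) (by omega : (0:Int) < 2),
        PySem.Int.floordiv_eq_ediv_of_pos (a := n - 20) (by omega : (0:Int) < 3)]
    unfold pvF; split_ifs <;> omega
  · rw [stat_adaption_loop, dif_neg hp, if_pos (by omega)]
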